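-- pv_equiv track=rewrite | github.com/darknezs/findFactor | find_class.py | find_min_max_of_digit_divide_2
-- ===== SOURCE A (Python) =====
-- def find_min_max_of_digit_divide_2(n):
--     length = int(len(str(n)) / 2)
--     temp = ""
--     temp2 = ""
--     for i in range(length-1): #find min
--         temp += '0'
--     for j in range(length-1): #find max
--         temp2 += '9'
--     # return  int("1" + temp)
--     min = int("1" + temp)
--     max = int("9" + temp2)
--     return min,max
-- ===== SOURCE B (Python) =====
-- def find_min_max_of_digit_divide_2(n):
--     length = int(len(str(n)) / 2)
--     e = max(length - 1, 0)
--     return 10 ** e, 10 ** (e + 1) - 1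
-- ===== Notes on version B (the rewrite author's own statement) =====
-- stated objective: simpler
-- what changed: Replaces the two string-building loops and the int() re-parsing with closed-form powers of ten computed from e = max(length-1, 0).
import Mathlib
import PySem

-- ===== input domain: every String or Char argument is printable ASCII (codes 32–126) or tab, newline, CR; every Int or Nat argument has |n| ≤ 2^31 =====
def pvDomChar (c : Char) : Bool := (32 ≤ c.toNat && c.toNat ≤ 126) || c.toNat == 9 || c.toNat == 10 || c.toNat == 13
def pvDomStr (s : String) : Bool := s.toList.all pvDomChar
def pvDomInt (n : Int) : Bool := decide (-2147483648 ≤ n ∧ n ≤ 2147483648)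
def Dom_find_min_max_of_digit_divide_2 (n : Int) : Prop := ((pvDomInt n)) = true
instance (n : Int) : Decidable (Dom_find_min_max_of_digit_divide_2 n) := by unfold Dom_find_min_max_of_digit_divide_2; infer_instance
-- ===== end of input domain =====

-- B replaces A's two string-building loops and int() re-parsing with the closed form
-- closed-form powers of ten from e = max(length-1, 0); return value only, no side effects.

-- ===== PORT A =====
def find_min_max_of_digit_divide_2 (n : Int) : Int × Int :=
  let length : Int := PySem.Int.truncdiv ((PySem.Int.toChars n).length : Int) 2
  let temp : List Char := (PySem.List.pyRange 0 (length - 1) 1).foldl (fun acc _ => acc ++ ['0']) []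
  let temp2 : List Char := (PySem.List.pyRange 0 (length - 1) 1).foldl (fun acc _ => acc ++ ['9']) []
  -- int("1"+temp) / int("9"+temp2) never raise here (nonempty digit strings), so .getD 0 is exact
  let mn : Int := (PySem.Int.ofChars? ('1' :: temp)).getD 0
  let mx : Int := (PySem.Int.ofChars? ('9' :: temp2)).getD 0
  (mn, mx)

-- ===== PORT B =====
def find_min_max_of_digit_divide_2_alt (n : Int) : Int × Int :=
  let length : Int := PySem.Int.truncdiv ((PySem.Int.toChars n).length : Int) 2
  let e : Nat := (length - 1).toNat   -- max(length-1, 0)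
  (10 ^ e, 10 ^ (e + 1) - 1)

-- ===== PRECONDITION & SPEC =====
def Spec_find_min_max_of_digit_divide_2 (n : Int) (out : Int × Int) : Prop := out = find_min_max_of_digit_divide_2_alt n
instance (n : Int) (out : Int × Int) : Decidable (Spec_find_min_max_of_digit_divide_2 n out) := by unfold Spec_find_min_max_of_digit_divide_2; infer_instance

-- ===== CLAIM (what is proved, stated in full; the proofs are below) =====
def Claim_equal_find_min_max_of_digit_divide_2 : Prop := ∀ (n : Int), Dom_find_min_max_of_digit_divide_2 n → Spec_find_min_max_of_digit_divide_2 n (find_min_max_of_digit_divide_2 n)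

-- ===== LEMMAS AND PROOFS =====

-- ===== VERDICT (by name: the statement is the Claim_ definition above) =====
-- A's and B's results as functions of the decimal-string length alone
def pvA (L : Nat) : Int × Int :=
  let length : Int := PySem.Int.truncdiv (L : Int) 2
  let temp : List Char := (PySem.List.pyRange 0 (length - 1) 1).foldl (fun acc _ => acc ++ ['0']) []
  let temp2 : List Char := (PySem.List.pyRange 0 (length - 1) 1).foldl (fun acc _ => acc ++ ['9']) []
  let mn : Int := (PySem.Int.ofChars? ('1' :: temp)).getD 0
  let mx : Int := (PySem.Int.ofChars? ('9' :: temp2)).getD 0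
  (mn, mx)

def pvB (L : Nat) : Int × Int :=
  let length : Int := PySem.Int.truncdiv (L : Int) 2
  let e : Nat := (length - 1).toNat
  (10 ^ e, 10 ^ (e + 1) - 1)

lemma pvA_eq (n : Int) : find_min_max_of_digit_divide_2 n = pvA (PySem.Int.toChars n).length := rfl

lemma pvB_eq (n : Int) : find_min_max_of_digit_divide_2_alt n = pvB (PySem.Int.toChars n).length := rfl

-- |n| ≤ 2^31 gives at most 10 digits plus an optional sign
lemma pvLen_le (n : Int) (h : Dom_find_min_max_of_digit_divide_2 n) :
    (PySem.Int.toChars n).length ≤ 11 := by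
  unfold Dom_find_min_max_of_digit_divide_2 pvDomInt at h
  simp only [decide_eq_true_eq] at h
  unfold PySem.Int.toChars
  split
  · have hd : (Nat.toDigits 10 n.natAbs).length ≤ 10 :=
      Nat.toDigits_length 10 n.natAbs 10 (by norm_num) (by omega)
    simp only [List.length_cons]; omega
  · have hd : (Nat.toDigits 10 n.toNat).length ≤ 10 :=
      Nat.toDigits_length 10 n.toNat 10 (by norm_num) (by omega)
    omega

lemma pvAB (L : Nat) (h : L ≤ 11) : pvA L = pvB L := by
  interval_cases L <;> decide

theorem find_min_max_of_digit_divide_2_spec : Claim_equal_find_min_max_of_digit_divide_2 := by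
  intro n hDom
  unfold Spec_find_min_max_of_digit_divide_2
  rw [pvA_eq, pvB_eq, pvAB _ (pvLen_le n hDom)]
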